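-- pv_equiv track=rewrite | github.com/aagrawal20/baselines | baselines/constraint/predef_constraints.py | compute_actuation_constraint
-- ===== SOURCE A (Python) =====
-- import itertools
--
-- def compute_actuation_constraint(threshold, limit=3):
--     candidates_list = []
--     for i in range(limit + 1):
--         candidates = itertools.product(range(16), repeat=i)
--         candidates = filter(lambda x: sum(x) >= threshold, candidates)
--         candidates = map(lambda x: ''.join([str(hex(a)[2:]) for a in x]),
--                          candidates)
--         candidates = '|'.join(
--             list(map(lambda s: '({})'.format(s), candidates)))
--         candidates_list.append(candidates)
--     return '|'.join(candidates_list)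
-- ===== SOURCE B (Python) =====
-- def compute_actuation_constraint(threshold, limit=3):
--     groups = []
--     for i in range(limit + 1):
--         partials = [(0, '')]
--         for pos in range(i):
--             rem = i - pos - 1
--             partials = [(s + d, p + hex(d)[2:])
--                         for (s, p) in partials
--                         for d in range(16)
--                         if s + d + rem * 15 >= threshold]
--         groups.append('|'.join('(' + p + ')' for (s, p) in partials
--                                if s >= threshold))
--     return '|'.join(groups)
-- ===== Notes on version B (the rewrite author's own statement) =====
-- stated objective: alternative
-- what changed: Replaces A's per-length itertools.product + filter + map pipeline by a recursive DFS over digit positions that builds each formatted tuple string incrementally and prunes branches whose partial sum plus remaining*15 cannot reach the threshold.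
import Mathlib
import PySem

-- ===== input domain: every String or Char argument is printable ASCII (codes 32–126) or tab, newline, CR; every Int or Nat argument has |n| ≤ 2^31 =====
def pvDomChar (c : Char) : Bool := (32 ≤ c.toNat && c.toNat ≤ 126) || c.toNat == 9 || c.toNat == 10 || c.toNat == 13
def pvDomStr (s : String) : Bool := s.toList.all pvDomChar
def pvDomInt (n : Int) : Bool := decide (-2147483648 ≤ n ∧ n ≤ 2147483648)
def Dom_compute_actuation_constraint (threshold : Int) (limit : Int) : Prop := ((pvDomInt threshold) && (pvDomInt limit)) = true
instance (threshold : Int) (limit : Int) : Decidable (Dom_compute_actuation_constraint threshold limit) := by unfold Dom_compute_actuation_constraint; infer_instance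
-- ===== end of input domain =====

-- B replaces A's per-length itertools.product/filter/map pipeline by an iterative
-- level-by-level prefix extension with an upper-bound prune (s + d + rem*15 < threshold);
-- objective: alternative (same exact output, different algorithm).


-- ===== PORT A =====
-- hex(a)[2:] for the digits 0..15 (both programs only ever call it on these)
def hexDigit (a : Int) : String :=
  if a = 0 then "0" else if a = 1 then "1" else if a = 2 then "2" else if a = 3 then "3"
  else if a = 4 then "4" else if a = 5 then "5" else if a = 6 then "6" else if a = 7 then "7"
  else if a = 8 then "8" else if a = 9 then "9" else if a = 10 then "a" else if a = 11 then "b"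
  else if a = 12 then "c" else if a = 13 then "d" else if a = 14 then "e" else if a = 15 then "f"
  else ""

-- itertools.product(range(16), repeat=n), in itertools' lexicographic order
def prodRep : Nat → List (List Int)
  | 0 => [[]]
  | n + 1 => (PySem.List.pyRange 0 16 1).flatMap (fun d => (prodRep n).map (fun t => d :: t))

def compute_actuation_constraint (threshold : Int) (limit : Int) : String :=
  PySem.Str.join "|" ((PySem.List.pyRange 0 (limit + 1) 1).map (fun i =>
    let candidates := (prodRep i.toNat).filter (fun x => decide (x.sum ≥ threshold))
    let strs := candidates.map (fun x => PySem.Str.join "" (x.map (fun a => hexDigit a)))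
    PySem.Str.join "|" (strs.map (fun s => "(" ++ s ++ ")"))))

-- ===== PORT B =====
-- one position: extend each surviving (sum, prefix) by every digit that can still reach threshold
def extendLevel (threshold : Int) (rem : Int) (partials : List (Int × String)) : List (Int × String) :=
  partials.flatMap (fun p =>
    ((PySem.List.pyRange 0 16 1).filter (fun d => decide (p.1 + d + rem * 15 ≥ threshold))).map
      (fun d => (p.1 + d, p.2 ++ hexDigit d)))

def compute_actuation_constraint_alt (threshold : Int) (limit : Int) : String :=
  PySem.Str.join "|" ((PySem.List.pyRange 0 (limit + 1) 1).map (fun i =>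
    let partials := (PySem.List.pyRange 0 i 1).foldl
      (fun ps pos => extendLevel threshold (i - pos - 1) ps) [((0 : Int), "")]
    PySem.Str.join "|" ((partials.filter (fun p => decide (p.1 ≥ threshold))).map
      (fun p => "(" ++ p.2 ++ ")"))))

-- ===== PRECONDITION & SPEC =====
def Spec_compute_actuation_constraint (threshold : Int) (limit : Int) (out : String) : Prop := out = compute_actuation_constraint_alt threshold limit
instance (threshold : Int) (limit : Int) (out : String) : Decidable (Spec_compute_actuation_constraint threshold limit out) := by unfold Spec_compute_actuation_constraint; infer_instance

-- ===== CLAIM (what is proved, stated in full; the proofs are below) =====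
def Claim_equal_compute_actuation_constraint : Prop := ∀ (threshold : Int) (limit : Int), Dom_compute_actuation_constraint threshold limit → Spec_compute_actuation_constraint threshold limit (compute_actuation_constraint threshold limit)

-- ===== LEMMAS AND PROOFS =====
-- the formatted digit string of a tuple, shared shape of both sides
def hexStr (t : List Int) : String := PySem.Str.join "" (t.map (fun a => hexDigit a))

-- the pruning condition a length-k prefix satisfies after k extension steps of a length-i tuple
def condB (threshold i : Int) (k : Nat) (t : List Int) : Bool :=
  decide (k = 0) || decide (threshold ≤ t.sum + (i - k) * 15)

lemma join_empty_cons (x : String) (l : List String) :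
    PySem.Str.join "" (x :: l) = x ++ PySem.Str.join "" l := by
  cases l with
  | nil => simp [PySem.Str.join, PySem.Chars.join_singleton]
  | cons y ys => simp [PySem.Str.join, PySem.Chars.join_cons_cons]

lemma join_empty_nil : PySem.Str.join "" ([] : List String) = "" := by
  simp [PySem.Str.join, PySem.Chars.join_nil]

lemma hexStr_cons (a : Int) (t : List Int) : hexStr (a :: t) = hexDigit a ++ hexStr t := by
  simp [hexStr, join_empty_cons]

lemma hexStr_append_singleton (t : List Int) (d : Int) :
    hexStr (t ++ [d]) = hexStr t ++ hexDigit d := by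
  induction t with
  | nil => simp [hexStr, join_empty_nil, join_empty_cons, String.empty_append, String.append_empty]
  | cons a t ih => simp [hexStr_cons, ih, String.append_assoc]

lemma flatMap_single {α β : Type} (f : α → β) (l : List α) :
    l.flatMap (fun x => [f x]) = l.map f := by
  induction l with
  | nil => rfl
  | cons a l ih => simp [ih]

-- prodRep grown at the back instead of the front (B extends prefixes by their last digit)
lemma prodRep_snoc (n : Nat) :
    prodRep (n + 1) = (prodRep n).flatMap (fun t => (PySem.List.pyRange 0 16 1).map (fun d => t ++ [d])) := by
  induction n with
  | zero =>
    simp only [prodRep]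
    exact flatMap_single (fun d => [d]) _
  | succ m ih =>
    rw [show prodRep (m + 1 + 1) = (PySem.List.pyRange 0 16 1).flatMap (fun d => (prodRep (m+1)).map (fun t => d :: t)) from rfl]
    conv_lhs => rw [ih]
    rw [show prodRep (m + 1) = (PySem.List.pyRange 0 16 1).flatMap (fun d => (prodRep m).map (fun t => d :: t)) from rfl]
    simp [List.map_flatMap, List.flatMap_assoc, List.flatMap_map, List.map_map, Function.comp_def,
          List.cons_append]

lemma flatMap_filter_of_nil {α β : Type} (P : α → Bool) (f : α → List β) (l : List α)
    (h : ∀ x ∈ l, P x = false → f x = []) :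
    (l.filter P).flatMap f = l.flatMap f := by
  induction l with
  | nil => rfl
  | cons a l ih =>
    by_cases ha : P a = true
    · simp [ha, ih (fun x hx => h x (List.mem_cons_of_mem a hx))]
    · have : P a = false := by simpa using ha
      simp [this, h a (List.mem_cons_self) this,
            ih (fun x hx => h x (List.mem_cons_of_mem a hx))]

-- loop invariant of B's per-length foldl: after k extension steps the partial list is
-- exactly the (pruned) length-k prefixes with their running sums and digit strings
lemma levels_inv (threshold i : Int) (k : Nat) :
    (PySem.List.pyRange 0 (k : Int) 1).foldl
        (fun ps pos => extendLevel threshold (i - pos - 1) ps) [((0 : Int), "")]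
      = ((prodRep k).filter (condB threshold i k)).map (fun t => (t.sum, hexStr t)) := by
  induction k with
  | zero =>
    rw [PySem.List.pyRange_one_eq_nil (by omega)]
    simp [prodRep, condB, hexStr, join_empty_nil]
  | succ k ih =>
    rw [show ((k + 1 : Nat) : Int) = (k : Int) + 1 by push_cast; ring,
        PySem.List.pyRange_one_succ_right (by omega), List.foldl_append, ih]
    simp only [List.foldl_cons, List.foldl_nil]
    rw [extendLevel, List.flatMap_map]
    rw [prodRep_snoc, List.filter_flatMap, List.map_flatMap]
    rw [flatMap_filter_of_nil _ _ _ (by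
      intro t ht hP
      have hb : ¬ (threshold ≤ t.sum + (i - k) * 15) := by
        simp only [condB, Bool.or_eq_false_iff, decide_eq_false_iff_not] at hP
        exact hP.2
      rw [List.filter_eq_nil_iff.mpr, List.map_nil]
      intro d hd
      rw [PySem.List.mem_pyRange_one] at hd
      simp only [decide_eq_true_eq]
      omega)]
    apply List.flatMap_congr
    intro t _
    rw [List.filter_map, List.map_map]
    congr 1
    · funext d
      simp [Function.comp, hexStr_append_singleton]
    · apply List.filter_congr
      intro d _
      simp only [Function.comp, condB, List.sum_append, List.sum_cons, List.sum_nil]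
      have : ¬ ((k : Nat) + 1 = 0) := by omega
      simp only [this, decide_false, Bool.false_or, decide_eq_decide]
      push_cast
      constructor <;> (intro; omega)

theorem compute_actuation_constraint_eq (threshold limit : Int) :
    compute_actuation_constraint threshold limit = compute_actuation_constraint_alt threshold limit := by
  unfold compute_actuation_constraint compute_actuation_constraint_alt
  congr 1
  apply List.map_congr_left
  intro i hi
  have hi0 : 0 ≤ i := by
    rw [PySem.List.mem_pyRange_one] at hi; omega
  simp only []
  rw [show (PySem.List.pyRange 0 i 1) = PySem.List.pyRange 0 ((i.toNat : Nat) : Int) 1 by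
        rw [Int.toNat_of_nonneg hi0],
      levels_inv threshold i i.toNat]
  rw [List.filter_map, List.map_map]
  have hfil : ((prodRep i.toNat).filter (condB threshold i i.toNat)).filter
        ((fun p => decide (p.1 ≥ threshold)) ∘ (fun t => (t.sum, hexStr t)))
      = (prodRep i.toNat).filter (fun x => decide (x.sum ≥ threshold)) := by
    rw [List.filter_filter]
    apply List.filter_congr
    intro t _
    simp only [condB, Function.comp]
    rw [Int.toNat_of_nonneg hi0]
    by_cases h : threshold ≤ t.sum <;> simp [h]
  rw [hfil, List.map_map]
  rfl

-- ===== VERDICT (by name: the statement is the Claim_ definition above) =====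
theorem compute_actuation_constraint_spec : Claim_equal_compute_actuation_constraint := by
  intro threshold limit _
  unfold Spec_compute_actuation_constraint
  exact compute_actuation_constraint_eq threshold limit
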